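-- pv_equiv track=rewrite | github.com/Suheily/Codewars | index.py | unpack_sausages
-- ===== SOURCE A (Python) =====
-- def unpack_sausages(truck):
--     display_counter = ""
--     package = []
--     sausage_package_counter = 0
--
--     for box in truck:
--         for pack in box:
--             if pack.startswith("["):
--                 package = pack[1:-1]
--
--                 if len(package) == 4 and len(set(package)) == 1:
--                     sausage_package_counter += 1
--
--                     if sausage_package_counter == 5:
--                         sausage_package_counter = 0
--                     else:
--                         for k in range(len(package)):
--                             display_counter += package[k] + " "
--
--     return display_counter[0:-1]
-- ===== SOURCE B (Python) =====
-- def unpack_sausages(truck):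
--     # Stage 1: one repeated character per valid package, in global order.
--     chars = [p[1] for box in truck for p in box
--              if len(p) == 6 and p[0] == "[" and p[1:5] == 4 * p[1]]
--     # Stage 2: consume the character stream in blocks of five, keeping the first four of each.
--     kept = []
--     while chars:
--         kept += chars[:4]
--         chars = chars[5:]
--     return " ".join(" ".join(4 * c) for c in kept)
-- ===== Notes on version B (the rewrite author's own statement) =====
-- stated objective: alternative
-- what changed: Replaced the single pass with a running counter reset at 5 by a staged pipeline: extract the one repeated character of each valid package (validity tested by p[1:5] == 4*p[1] on a length-6 string instead of set()), then consume that character stream in blocks of five with a slicing while-loop keeping the first four of each block, and render via a nested join of each character repeated four times.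
import Mathlib
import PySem

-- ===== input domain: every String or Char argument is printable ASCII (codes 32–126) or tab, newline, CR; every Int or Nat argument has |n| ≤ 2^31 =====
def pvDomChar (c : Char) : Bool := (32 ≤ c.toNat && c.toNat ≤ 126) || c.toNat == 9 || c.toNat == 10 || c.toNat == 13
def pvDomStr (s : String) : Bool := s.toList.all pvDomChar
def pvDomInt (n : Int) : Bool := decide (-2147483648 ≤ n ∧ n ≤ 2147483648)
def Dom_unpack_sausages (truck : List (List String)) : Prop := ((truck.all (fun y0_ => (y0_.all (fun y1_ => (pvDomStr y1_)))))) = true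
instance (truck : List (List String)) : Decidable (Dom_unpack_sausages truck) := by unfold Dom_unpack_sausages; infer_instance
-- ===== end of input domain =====

-- B is an 'alternative' implementation: it extracts the one repeated character per valid
-- package (validity via p[1:5] == 4*p[1] on a length-6 string), then drops every fifth by
-- consuming the stream in blocks of five with a slicing loop; A keeps a running counter
-- reset at 5 in one pass.

-- ===== PORT A =====
-- the body of A's inner 'for pack in box' loop, on the state (display_counter, sausage_package_counter)
def pvStepA (st : List Char × Int) (pack : String) : List Char × Int :=
  if PySem.Str.startswith pack "[" then
    let package := PySem.List.slice pack.toList (some 1) (some (-1))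
    if package.length == 4 && PySem.Set.len (PySem.Set.ofList package) == 1 then
      let cnt := st.2 + 1
      if cnt == 5 then (st.1, 0)
      else ((PySem.List.pyRange 0 package.length 1).foldl
              (fun d k => d ++ [(PySem.List.pyGet? package k).getD ' ', ' ']) st.1, cnt)
    else st
  else st

def unpack_sausages (truck : List (List String)) : String :=
  let final := truck.foldl (fun st box => box.foldl pvStepA st) (([] : List Char), (0 : Int))
  String.ofList (PySem.List.slice final.1 (some 0) (some (-1)))

-- ===== PORT B =====
-- len(p) == 6 and p[0] == "[" and p[1:5] == 4 * p[1]   (index 1 exists once the length test passed,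
-- so the .getD ' ' default of the optional lookup is never used on accepted packs)
def pvValidB (p : String) : Bool :=
  p.toList.length == 6 &&
  (PySem.List.pyGet? p.toList 0 == some '[') &&
  (PySem.List.slice p.toList (some 1) (some 5)
     == List.replicate 4 ((PySem.List.pyGet? p.toList 1).getD ' '))

-- the while-loop: kept += chars[:4]; chars = chars[5:]
def pvChunk (kept chars : List Char) : List Char :=
  if h : chars = [] then kept
  else pvChunk (kept ++ PySem.List.slice chars none (some 4))
               (PySem.List.slice chars (some 5) none)
termination_by chars.length
decreasing_by
  have hl : 0 < chars.length := List.length_pos_iff.2 h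
  simp [pysem]
  omega

def unpack_sausages_alt (truck : List (List String)) : String :=
  let chars := truck.flatMap (fun box =>
    (box.filter pvValidB).map (fun p => (PySem.List.pyGet? p.toList 1).getD ' '))
  let kept := pvChunk [] chars
  PySem.Str.join " " (kept.map (fun c =>
    PySem.Str.join " " ((List.replicate 4 c).map (fun ch => String.ofList [ch]))))

-- ===== PRECONDITION & SPEC =====
def Spec_unpack_sausages (truck : List (List String)) (out : String) : Prop := out = unpack_sausages_alt truck
instance (truck : List (List String)) (out : String) : Decidable (Spec_unpack_sausages truck out) := by unfold Spec_unpack_sausages; infer_instance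

-- ===== CLAIM (what is proved, stated in full; the proofs are below) =====
def Claim_equal_unpack_sausages : Prop := ∀ (truck : List (List String)), Dom_unpack_sausages truck → Spec_unpack_sausages truck (unpack_sausages truck)

-- ===== LEMMAS AND PROOFS =====

-- A's validity test, as a predicate (used only in the proofs)
def pvIsValid (pack : String) : Bool :=
  PySem.Str.startswith pack "[" &&
  (PySem.List.slice pack.toList (some 1) (some (-1))).length == 4 &&
  PySem.Set.len (PySem.Set.ofList (PySem.List.slice pack.toList (some 1) (some (-1)))) == 1

-- the stripped valid packages of a list of packs
def pvValids (ps : List String) : List (List Char) :=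
  (ps.filter pvIsValid).map (fun p => PySem.List.slice p.toList (some 1) (some (-1)))

-- the characters kept when the valid packages start at global (0-based) index k (flattened)
def pvKeep (vs : List (List Char)) (k : Nat) : List Char :=
  match vs with
  | [] => []
  | p :: rest => (if (k + 1) % 5 ≠ 0 then p else []) ++ pvKeep rest (k + 1)

-- the kept packages themselves
def pvSel {α : Type} (vs : List α) (k : Nat) : List α :=
  match vs with
  | [] => []
  | p :: rest => (if (k + 1) % 5 ≠ 0 then [p] else []) ++ pvSel rest (k + 1)

-- block-of-five chunking, accumulator-free
def pvChunkS {α : Type} (l : List α) : List α :=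
  if h : l = [] then [] else l.take 4 ++ pvChunkS (l.drop 5)
termination_by l.length
decreasing_by
  have hl : 0 < l.length := List.length_pos_iff.2 h
  simp
  omega

-- each kept character followed by one space, as A's display string accumulates them
def pvExpand (l : List Char) : List Char := l.flatMap (fun c => [c, ' '])

lemma pvFold_flatten (truck : List (List String)) (st : List Char × Int) :
    truck.foldl (fun st box => box.foldl pvStepA st) st = (truck.flatten).foldl pvStepA st := by
  induction truck generalizing st with
  | nil => rfl
  | cons b t ih => simp [List.foldl_append, ih]

lemma pvMainA (ps : List String) (disp : List Char) (k : Nat) :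
    ps.foldl pvStepA (disp, ((k % 5 : Nat) : Int))
      = (disp ++ pvExpand (pvKeep (pvValids ps) k), (((k + (pvValids ps).length) % 5 : Nat) : Int)) := by
  induction ps generalizing disp k with
  | nil => simp [pvValids, pvKeep, pvExpand]
  | cons p rest ih =>
    rw [List.foldl_cons]
    by_cases hv : pvIsValid p = true
    · have hv' := hv
      simp only [pvIsValid, Bool.and_eq_true, beq_iff_eq] at hv'
      obtain ⟨⟨hs, hlen⟩, hset⟩ := hv'
      have hs' : PySem.Chars.startswith p.toList ['['] = true := by simpa using hs
      obtain ⟨c1, c2, c3, c4, hpkg⟩ : ∃ a b c d,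
          PySem.List.slice p.toList (some 1) (some (-1)) = [a, b, c, d] := by
        match PySem.List.slice p.toList (some 1) (some (-1)), hlen with
        | [a, b, c, d], _ => exact ⟨a, b, c, d, rfl⟩
      have hset' : PySem.Set.len (PySem.Set.ofList [c1, c2, c3, c4]) = 1 := hpkg ▸ hset
      have hsetL : List.length (PySem.Set.ofList [c1, c2, c3, c4]) = 1 := by
        simpa [PySem.Set.len] using hset'
      by_cases h5 : (k + 1) % 5 = 0
      · have hstep : pvStepA (disp, ((k % 5 : Nat) : Int)) p = (disp, 0) := by
          simp [pvStepA, hs', hpkg]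
          rw [if_pos hsetL, if_pos (by omega)]
        rw [hstep, show (0 : Int) = (((k + 1) % 5 : Nat) : Int) by simp [h5], ih disp (k + 1)]
        simp only [pvValids, List.filter_cons_of_pos hv, List.map_cons, pvKeep, h5,
          ne_eq, not_true_eq_false, if_false, List.nil_append, List.length_cons]
        rw [Prod.mk.injEq]
        exact ⟨rfl, by omega⟩
      · have hstep : pvStepA (disp, ((k % 5 : Nat) : Int)) p
            = (disp ++ [c1, ' ', c2, ' ', c3, ' ', c4, ' '], ((k % 5 : Nat) : Int) + 1) := by
          simp [pvStepA, hs', hpkg]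
          rw [if_pos hsetL, if_neg (by omega)]
          have hr : PySem.List.pyRange 0 (4 : Int) 1 = [0, 1, 2, 3] := by decide
          rw [Prod.mk.injEq]
          refine ⟨?_, by omega⟩
          rw [hr]
          simp [PySem.List.pyGet?, PySem.List.pyIdx?]
        rw [hstep, show ((k % 5 : Nat) : Int) + 1 = (((k + 1) % 5 : Nat) : Int) by omega,
          ih _ (k + 1)]
        simp only [pvValids, List.filter_cons_of_pos hv, List.map_cons, pvKeep, h5,
          ne_eq, not_false_iff, if_true, hpkg, List.length_cons]
        rw [Prod.mk.injEq]
        exact ⟨by simp [pvExpand], by omega⟩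
    · have hstep : pvStepA (disp, ((k % 5 : Nat) : Int)) p = (disp, ((k % 5 : Nat) : Int)) := by
        by_cases hs : PySem.Str.startswith p "[" = true
        · have h2 : ¬ (((PySem.List.slice p.toList (some 1) (some (-1))).length == 4 &&
              PySem.Set.len (PySem.Set.ofList (PySem.List.slice p.toList (some 1) (some (-1)))) == 1) = true) := by
            intro h
            rw [Bool.and_eq_true, beq_iff_eq, beq_iff_eq] at h
            have hvt : pvIsValid p = true := by
              unfold pvIsValid
              rw [hs, h.1, h.2]
              simp
            simp [hvt] at hv
          simp only [pvStepA]
          rw [if_pos hs, if_neg h2]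
        · simp only [pvStepA]
          rw [if_neg hs]
      rw [hstep, ih disp k]
      simp [pvValids, List.filter_cons_of_neg hv]

-- the common shape of a valid pack: '[' then four copies of one character then one more character
lemma pvIsValid_iff (p : String) :
    pvIsValid p = true ↔ ∃ c f, p.toList = '[' :: c :: c :: c :: c :: [f] := by
  constructor
  · intro h
    simp only [pvIsValid, Bool.and_eq_true, beq_iff_eq] at h
    obtain ⟨⟨hs, hlen⟩, hset⟩ := h
    have hs' : ['['] <+: p.toList := by
      have := (PySem.Chars.startswith_iff p.toList ['[']).1 (by simpa using hs)
      exact this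
    have hlen6 : p.toList.length = 6 := by
      have hl := PySem.List.length_slice p.toList (1 : Int) (-1 : Int)
      rw [hlen] at hl
      have h1 : PySem.List.clampIdx p.toList.length (-1) = p.toList.length - 1 := by
        simp
      have h2 : PySem.List.clampIdx p.toList.length 1 = min 1 p.toList.length := by
        exact_mod_cast PySem.List.clampIdx_natCast p.toList.length 1
      have hne : p.toList ≠ [] := by
        rcases hs' with ⟨t, ht⟩
        simp [← ht]
      have hpos : 0 < p.toList.length := List.length_pos_iff.2 hne
      omega
    obtain ⟨a, b, c, d, e, f, hl⟩ : ∃ a b c d e f, p.toList = [a, b, c, d, e, f] := by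
      match p.toList, hlen6 with
      | [a, b, c, d, e, f], _ => exact ⟨a, b, c, d, e, f, rfl⟩
    have ha : a = '[' := by
      rcases hs' with ⟨t, ht⟩
      rw [hl] at ht
      cases ht
      rfl
    have hsl : PySem.List.slice p.toList (some 1) (some (-1)) = [b, c, d, e] := by
      rw [hl]
      simp [PySem.List.slice, PySem.List.clampIdx]
    rw [hsl] at hset
    obtain ⟨x, hx⟩ := List.length_eq_one_iff.1 (by simpa [PySem.Set.len] using hset)
    have hmem : ∀ y, y ∈ ([b, c, d, e] : List Char) → y = x := by
      intro y hy
      have : y ∈ PySem.Set.ofList [b, c, d, e] := (PySem.Set.mem_ofList _ _).2 hy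
      rw [hx] at this
      simpa using this
    have hb := hmem b (by simp)
    have hc := hmem c (by simp)
    have hd := hmem d (by simp)
    have he := hmem e (by simp)
    exact ⟨x, f, by rw [hl, ha, hb, hc, hd, he]⟩
  · rintro ⟨c, f, hl⟩
    simp only [pvIsValid, Bool.and_eq_true, beq_iff_eq]
    refine ⟨⟨?_, ?_⟩, ?_⟩
    · simp [PySem.Str.startswith, hl, PySem.Chars.startswith_iff]
    · rw [hl]; simp [PySem.List.slice, PySem.List.clampIdx]
    · rw [hl]
      have : PySem.List.slice ('[' :: c :: c :: c :: c :: [f]) (some 1) (some (-1)) = [c, c, c, c] := by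
        simp [PySem.List.slice, PySem.List.clampIdx]
      rw [this]
      simp [PySem.Set.len, PySem.Set.ofList, PySem.Set.add, PySem.Set.contains]

lemma pvValidB_iff (p : String) :
    pvValidB p = true ↔ ∃ c f, p.toList = '[' :: c :: c :: c :: c :: [f] := by
  constructor
  · intro h
    simp only [pvValidB, Bool.and_eq_true, beq_iff_eq] at h
    obtain ⟨⟨hlen, hget⟩, hsl⟩ := h
    obtain ⟨a, b, c, d, e, f, hl⟩ : ∃ a b c d e f, p.toList = [a, b, c, d, e, f] := by
      match p.toList, hlen with
      | [a, b, c, d, e, f], _ => exact ⟨a, b, c, d, e, f, rfl⟩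
    rw [hl] at hget hsl
    have ha : a = '[' := by
      simpa [PySem.List.pyGet?, PySem.List.pyIdx?] using hget
    have h1 : PySem.List.pyGet? ([a, b, c, d, e, f] : List Char) 1 = some b := by
      simp [PySem.List.pyGet?, PySem.List.pyIdx?]
    rw [h1] at hsl
    have hsl' : ([b, c, d, e] : List Char) = [b, b, b, b] := by
      have h2 : PySem.List.slice ([a, b, c, d, e, f] : List Char) (some 1) (some 5) = [b, c, d, e] := by
        simp [PySem.List.slice, PySem.List.clampIdx]
      rw [h2] at hsl
      simpa [List.replicate] using hsl
    obtain ⟨hc, hd, he⟩ : c = b ∧ d = b ∧ e = b := by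
      have := List.cons.injEq .. ▸ hsl'
      simp at hsl'
      exact ⟨hsl'.1, hsl'.2.1, hsl'.2.2⟩
    exact ⟨b, f, by rw [hl, ha, hc, hd, he]⟩
  · rintro ⟨c, f, hl⟩
    simp only [pvValidB, Bool.and_eq_true, beq_iff_eq]
    rw [hl]
    refine ⟨⟨by simp, by simp [PySem.List.pyGet?, PySem.List.pyIdx?]⟩, ?_⟩
    have h1 : PySem.List.pyGet? ('[' :: c :: c :: c :: c :: [f]) 1 = some c := by
      simp [PySem.List.pyGet?, PySem.List.pyIdx?]
    rw [h1]
    simp [PySem.List.slice, PySem.List.clampIdx, List.replicate]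

lemma pvValidB_eq (p : String) : pvValidB p = pvIsValid p := by
  rw [Bool.eq_iff_iff, pvValidB_iff, pvIsValid_iff]

-- B's character stream = the heads of A's valid packages
lemma pvChars_eq (ps : List String) :
    (ps.filter pvValidB).map (fun p => (PySem.List.pyGet? p.toList 1).getD ' ')
      = (pvValids ps).map (fun pkg => pkg.headD ' ') := by
  rw [List.filter_congr (fun p _ => pvValidB_eq p)]
  unfold pvValids
  rw [List.map_map]
  refine List.map_congr_left ?_
  intro p hp
  have hv : pvIsValid p = true := (List.mem_filter.1 hp).2
  obtain ⟨c, f, hl⟩ := (pvIsValid_iff p).1 hv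
  have h1 : PySem.List.pyGet? p.toList 1 = some c := by
    rw [hl]; simp [PySem.List.pyGet?, PySem.List.pyIdx?]
  have h2 : PySem.List.slice p.toList (some 1) (some (-1)) = [c, c, c, c] := by
    rw [hl]; simp [PySem.List.slice, PySem.List.clampIdx]
  simp [h1, h2]

-- each valid package is four copies of its head
lemma pvValids_shape (ps : List String) :
    ∀ pkg ∈ pvValids ps, pkg = List.replicate 4 (pkg.headD ' ') := by
  intro pkg hpkg
  unfold pvValids at hpkg
  obtain ⟨p, hp, hsl⟩ := List.mem_map.1 hpkg
  obtain ⟨c, f, hl⟩ := (pvIsValid_iff p).1 (List.mem_filter.1 hp).2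
  have h2 : PySem.List.slice p.toList (some 1) (some (-1)) = [c, c, c, c] := by
    rw [hl]; simp [PySem.List.slice, PySem.List.clampIdx]
  rw [← hsl, h2]
  simp [List.replicate]

lemma pvCharsFlat (truck : List (List String)) :
    truck.flatMap (fun box =>
      (box.filter pvValidB).map (fun p => (PySem.List.pyGet? p.toList 1).getD ' '))
        = (pvValids truck.flatten).map (fun pkg => pkg.headD ' ') := by
  rw [← pvChars_eq]
  induction truck with
  | nil => rfl
  | cons b t _ => simp [List.filter_append, List.flatMap_def, Function.comp_def]

lemma pvKeep_eq_sel (vs : List (List Char)) (k : Nat) :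
    pvKeep vs k = (pvSel vs k).flatten := by
  induction vs generalizing k with
  | nil => rfl
  | cons p r ih =>
    by_cases h : (k + 1) % 5 = 0 <;> simp [pvKeep, pvSel, h, ih]

lemma pvSel_add5 {α : Type} (vs : List α) (k : Nat) : pvSel vs (k + 5) = pvSel vs k := by
  induction vs generalizing k with
  | nil => rfl
  | cons p r ih =>
    have : (k + 5 + 1) % 5 = (k + 1) % 5 := by omega
    simp only [pvSel, this]
    rw [show k + 5 + 1 = k + 1 + 5 by omega, ih]

lemma pvSel_block {α : Type} (vs : List α) :
    pvSel vs 0 = vs.take 4 ++ pvSel (vs.drop 5) 0 := by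
  rcases vs with _ | ⟨a, _ | ⟨b, _ | ⟨c, _ | ⟨d, _ | ⟨e, r⟩⟩⟩⟩⟩ <;>
    simp [pvSel, pvSel_add5]

lemma pvSel_map {α β : Type} (f : α → β) (l : List α) (k : Nat) :
    pvSel (l.map f) k = (pvSel l k).map f := by
  induction l generalizing k with
  | nil => rfl
  | cons a r ih =>
    by_cases h : (k + 1) % 5 = 0 <;> simp [pvSel, h, ih]

lemma pvSel_subset {α : Type} (l : List α) (k : Nat) : ∀ a ∈ pvSel l k, a ∈ l := by
  induction l generalizing k with
  | nil => simp [pvSel]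
  | cons x r ih =>
    intro a ha
    by_cases h : (k + 1) % 5 = 0
    · simp only [pvSel, h, ne_eq, not_true_eq_false, if_false, List.nil_append] at ha
      exact List.mem_cons_of_mem _ (ih (k + 1) a ha)
    · simp only [pvSel, h, ne_eq, not_false_iff, if_true] at ha
      rcases List.mem_append.1 ha with h1 | h2
      · simp at h1; simp [h1]
      · exact List.mem_cons_of_mem _ (ih (k + 1) a h2)

lemma pvChunk_acc (kept chars : List Char) : pvChunk kept chars = kept ++ pvChunkS chars := by
  induction kept, chars using pvChunk.induct with
  | case1 kept => simp [pvChunk, pvChunkS]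
  | case2 kept chars h ih =>
    rw [pvChunk, pvChunkS]
    simp only [h, dite_false]
    rw [ih]
    simp [pysem, List.append_assoc]

lemma pvChunkS_eq_sel {α : Type} (l : List α) : pvChunkS l = pvSel l 0 := by
  induction l using pvChunkS.induct with
  | case1 => rw [pvChunkS]; simp [pvSel]
  | case2 l h ih =>
    rw [pvChunkS]
    simp only [h, dite_false]
    rw [ih, ← pvSel_block]

-- joins
lemma pvJoinChars (l : List Char) :
    (pvExpand l).dropLast = PySem.Chars.join [' '] (l.map (fun c => [c])) := by
  induction l with
  | nil => simp [pvExpand, PySem.Chars.join, List.intercalate]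
  | cons a t ih =>
    cases t with
    | nil => simp [pvExpand, PySem.Chars.join_singleton]
    | cons b r =>
      rw [List.map_cons, List.map_cons, PySem.Chars.join_cons_cons]
      rw [List.map_cons] at ih
      rw [← ih]
      show ((a :: ' ' :: pvExpand (b :: r)).dropLast) = _
      rw [show a :: ' ' :: pvExpand (b :: r) = [a, ' '] ++ pvExpand (b :: r) from rfl,
        List.dropLast_append_of_ne_nil (by simp [pvExpand])]
      simp

lemma pvJoin (l : List Char) :
    String.ofList (PySem.List.slice (pvExpand l) (some 0) (some (-1)))
      = PySem.Str.join " " (l.map (fun c => String.ofList [c])) := by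
  rw [PySem.List.slice_zero_start, PySem.List.slice_to_neg_one, pvJoinChars]
  simp [PySem.Str.join, Function.comp_def, String.toList_ofList]

lemma pvJoin_append (xs ys : List (List Char)) (sep : List Char)
    (hx : xs ≠ []) (hy : ys ≠ []) :
    PySem.Chars.join sep (xs ++ ys) = PySem.Chars.join sep xs ++ sep ++ PySem.Chars.join sep ys := by
  induction xs with
  | nil => exact absurd rfl hx
  | cons x t ih =>
    cases t with
    | nil =>
      cases ys with
      | nil => exact absurd rfl hy
      | cons y r => rw [List.singleton_append, PySem.Chars.join_cons_cons, PySem.Chars.join_singleton]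
    | cons x2 t2 =>
      rw [List.cons_append, PySem.Chars.join_cons_cons]
      rw [show (x2 :: t2) ++ ys = x2 :: (t2 ++ ys) from rfl] at *
      rw [PySem.Chars.join_cons_cons, ih (by simp) ]
      simp [List.append_assoc]

lemma pvJoin_flatten (vss : List (List Char)) (h : ∀ v ∈ vss, v ≠ []) :
    PySem.Chars.join [' '] (vss.flatten.map (fun c => [c]))
      = PySem.Chars.join [' '] (vss.map (fun v => PySem.Chars.join [' '] (v.map (fun c => [c])))) := by
  induction vss with
  | nil => rfl
  | cons v t ih =>
    cases t with
    | nil => simp [PySem.Chars.join_singleton]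
    | cons w r =>
      have hv : v ≠ [] := h v (by simp)
      have ht : ∀ u ∈ w :: r, u ≠ [] := fun u hu => h u (List.mem_cons_of_mem _ hu)
      have hwne : (w :: r).flatten ≠ [] := by
        have hw : w ≠ [] := ht w (by simp)
        simp only [List.flatten_cons, ne_eq, List.append_eq_nil_iff, not_and]
        intro hweq; exact absurd hweq hw
      rw [List.flatten_cons, List.map_append,
        pvJoin_append _ _ _ (by simpa using hv) (by simpa using hwne),
        ih ht]
      simp only [List.map_cons, PySem.Chars.join_cons_cons, List.append_assoc]

theorem unpack_sausages_spec_aux (truck : List (List String)) :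
    unpack_sausages truck = unpack_sausages_alt truck := by
  -- A side
  have hA := pvMainA truck.flatten [] 0
  norm_num at hA
  simp only [unpack_sausages, unpack_sausages_alt]
  rw [pvFold_flatten, hA, pvJoin]
  -- B side: chars, then chunking
  rw [pvCharsFlat, pvChunk_acc, List.nil_append, pvChunkS_eq_sel, pvSel_map]
  -- rewrite each kept replicate-4 block back to its package
  have hrepl : (pvSel (pvValids truck.flatten) 0).map
        (fun pkg => PySem.Str.join " " ((List.replicate 4 (pkg.headD ' ')).map (fun ch => String.ofList [ch])))
      = (pvSel (pvValids truck.flatten) 0).map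
        (fun pkg => PySem.Str.join " " (pkg.map (fun ch => String.ofList [ch]))) := by
    refine List.map_congr_left ?_
    intro pkg hpkg
    have := pvValids_shape truck.flatten pkg (pvSel_subset _ 0 pkg hpkg)
    rw [← this]
  rw [List.map_map]
  simp only [Function.comp_def]
  rw [hrepl]
  -- flatten vs nested join
  rw [pvKeep_eq_sel]
  have hne : ∀ v ∈ pvSel (pvValids truck.flatten) 0, v ≠ [] := by
    intro v hv
    have := pvValids_shape truck.flatten v (pvSel_subset _ 0 v hv)
    rw [this]; simp
  have hjoin := pvJoin_flatten (pvSel (pvValids truck.flatten) 0) hne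
  simp only [PySem.Str.join]
  congr 1
  simpa [Function.comp_def, String.toList_ofList, List.map_map] using hjoin

-- ===== VERDICT (by name: the statement is the Claim_ definition above) =====
theorem unpack_sausages_spec : Claim_equal_unpack_sausages := by
  intro truck _
  unfold Spec_unpack_sausages
  exact unpack_sausages_spec_aux truck
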